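-- pv_equiv track=rewrite | github.com/samuelkabak/akkapros | src/akkapros/lib/_gen_diphthongs.py | _combine_entries
-- ===== SOURCE A (Python) =====
-- from collections import defaultdict
--
-- def _combine_entries(entries):
--     grouped = defaultdict(list)
--     for pattern, repl, second_tilde in entries:
--         grouped[(second_tilde, repl)].append(pattern)
--
--     combined = []
--     for (second_tilde, repl), patterns in grouped.items():
--         uniq = sorted(set(patterns), key=lambda p: (-len(p), p))
--         if len(uniq) == 1:
--             regex = uniq[0]
--         else:
--             regex = '(?:' + '|'.join(uniq) + ')'
--         combined.append((regex, repl, second_tilde))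
--
--     # IMPORTANT: second-vowel-tilde patterns first to avoid clashes.
--     combined.sort(key=lambda x: (0 if x[2] else 1, -len(x[0]), x[1], x[0]))
--     return combined
-- ===== SOURCE B (Python) =====
-- def _combine_entries(entries):
--     # Distinct group keys in first-occurrence order; patterns for each group are
--     # collected by a per-key scan instead of accumulating a dict of lists.
--     order = dict.fromkeys((st, r) for _, r, st in entries)
--     combined = []
--     for st, r in order:
--         uniq = sorted({p for p, r2, st2 in entries if (st2, r2) == (st, r)},
--                       key=lambda p: (-len(p), p))
--         regex = uniq[0] if len(uniq) == 1 else '(?:' + '|'.join(uniq) + ')'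
--         combined.append((regex, r, st))
--     combined.sort(key=lambda x: (0 if x[2] else 1, -len(x[0]), x[1], x[0]))
--     return combined
-- ===== Notes on version B (the rewrite author's own statement) =====
-- stated objective: idiomatic
-- what changed: Replaces the defaultdict-of-lists accumulation by deduplicating the group keys in first-occurrence order (dict.fromkeys) and collecting each group's patterns with a per-key comprehension scan over the entries; regex building and the final sort are unchanged.
import Mathlib
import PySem

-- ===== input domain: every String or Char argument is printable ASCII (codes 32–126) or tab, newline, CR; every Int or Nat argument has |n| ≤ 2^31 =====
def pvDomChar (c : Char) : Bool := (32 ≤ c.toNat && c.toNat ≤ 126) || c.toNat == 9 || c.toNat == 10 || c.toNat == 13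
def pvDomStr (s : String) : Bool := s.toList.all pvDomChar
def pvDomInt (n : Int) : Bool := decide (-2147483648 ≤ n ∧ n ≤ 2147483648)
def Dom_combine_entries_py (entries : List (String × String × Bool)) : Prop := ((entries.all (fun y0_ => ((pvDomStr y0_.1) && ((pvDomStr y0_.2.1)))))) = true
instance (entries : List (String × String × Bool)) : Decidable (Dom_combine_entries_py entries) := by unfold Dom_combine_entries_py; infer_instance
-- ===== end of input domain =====

-- B replaces A's defaultdict-of-lists accumulation by first-occurrence key dedup plus a
-- per-key scan of the entries (idiomatic, no intermediate dict of lists); return value only.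

-- the shared regex builder (the same Python lines appear verbatim in A and in B)
def pvRegexOf (pats : List String) : String :=
  let uniq := PySem.List.sorted2 (PySem.Set.ofList pats) (fun p => -(PySem.Str.len p)) (fun p => p) false
  if uniq.length == 1 then uniq.getD 0 "" else "(?:" ++ PySem.Str.join "|" uniq ++ ")"

-- Python's tuple key (0 if x[2] else 1, -len(x[0]), x[1], x[0]) compared lexicographically,
-- ported by hand (exact: Lean's String '<' is Python's on the ASCII domain); list.sort(key=…)
-- is the stable insertion sort PySem.List.sorted computes (PySem.List.sorted_eq_foldl_insertBy).
def pvSortKeyLt (x y : String × String × Bool) : Bool :=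
  let a1 : Int := if x.2.2 then 0 else 1
  let b1 : Int := if y.2.2 then 0 else 1
  if a1 ≠ b1 then a1 < b1
  else if PySem.Str.len x.1 ≠ PySem.Str.len y.1 then -(PySem.Str.len x.1) < -(PySem.Str.len y.1)
  else if x.2.1 ≠ y.2.1 then x.2.1 < y.2.1
  else x.1 < y.1

-- ===== PORT A =====
def combine_entries_py (entries : List (String × String × Bool)) : List (String × String × Bool) :=
  let grouped : PySem.Dict (Bool × String) (List String) :=
    entries.foldl (fun d e => d.modify (e.2.2, e.2.1) [] (· ++ [e.1])) PySem.Dict.empty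
  let combined : List (String × String × Bool) :=
    grouped.items.foldl (fun acc kp => acc ++ [(pvRegexOf kp.2, kp.1.2, kp.1.1)]) []
  combined.foldl (fun acc x => PySem.List.insertBy pvSortKeyLt x acc) []

-- ===== PORT B =====
def combine_entries_py_alt (entries : List (String × String × Bool)) : List (String × String × Bool) :=
  let order := PySem.List.dedup (entries.map (fun e => (e.2.2, e.2.1)))
  let combined := order.map (fun k =>
    (pvRegexOf ((entries.filter (fun e => (e.2.2, e.2.1) == k)).map (·.1)), k.2, k.1))
  combined.foldl (fun acc x => PySem.List.insertBy pvSortKeyLt x acc) []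

-- ===== PRECONDITION & SPEC =====
def Spec_combine_entries_py (entries : List (String × String × Bool)) (out : List (String × String × Bool)) : Prop := out = combine_entries_py_alt entries
instance (entries : List (String × String × Bool)) (out : List (String × String × Bool)) : Decidable (Spec_combine_entries_py entries out) := by unfold Spec_combine_entries_py; infer_instance

-- ===== CLAIM (what is proved, stated in full; the proofs are below) =====
def Claim_equal_combine_entries_py : Prop := ∀ (entries : List (String × String × Bool)), Dom_combine_entries_py entries → Spec_combine_entries_py entries (combine_entries_py entries)

-- ===== LEMMAS AND PROOFS =====

-- the grouping dict's items are exactly: first-occurrence keys, each with its filtered pattern list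
theorem pv_items_grouped (entries : List (String × String × Bool)) :
    (entries.foldl (fun d e => d.modify (e.2.2, e.2.1) [] (· ++ [e.1]))
      (PySem.Dict.empty : PySem.Dict (Bool × String) (List String))).items
    = (PySem.List.dedup (entries.map (fun e => (e.2.2, e.2.1)))).map
        (fun k => (k, (entries.filter (fun e => (e.2.2, e.2.1) == k)).map (·.1))) := by
  set d := entries.foldl (fun d e => d.modify (e.2.2, e.2.1) [] (· ++ [e.1]))
      (PySem.Dict.empty : PySem.Dict (Bool × String) (List String)) with hd
  have hnd : d.keys.Nodup := by
    rw [hd]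
    exact PySem.Dict.nodup_keys_foldl_modify_key entries (fun e => (e.2.2, e.2.1)) []
      (fun d e => (· ++ [e.1])) PySem.Dict.empty (by simp)
  have hkeys : d.keys = PySem.List.dedup (entries.map (fun e => (e.2.2, e.2.1))) := by
    rw [hd, PySem.Dict.keys_foldl_modify_key]
    rfl
  have hget : ∀ k, d.getD k [] = (entries.filter (fun e => (e.2.2, e.2.1) == k)).map (·.1) := by
    intro k
    have hfold : (List.foldl (fun d e => d.modify (e.2.2, e.2.1) [] fun x => x ++ [e.1])
        (PySem.Dict.empty : PySem.Dict (Bool × String) (List String)) entries)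
        = List.foldl (fun (d : PySem.Dict (Bool × String) (List String)) p => d.modify p.1 [] fun x => x ++ [p.2])
            PySem.Dict.empty (entries.map (fun e => ((e.2.2, e.2.1), e.1))) :=
      (List.foldl_map (f := fun e : String × String × Bool => ((e.2.2, e.2.1), e.1))
        (g := fun (d : PySem.Dict (Bool × String) (List String)) p => d.modify p.1 [] fun x => x ++ [p.2])
        (l := entries) (init := PySem.Dict.empty)).symm
    rw [hd, hfold, PySem.Dict.getD_foldl_modify_append]
    simp [List.filter_map, List.map_map, Function.comp_def]
  rw [PySem.Dict.items_eq_map_keys d hnd [], hkeys]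
  exact List.map_congr_left (fun k _ => by rw [hget k])

-- ===== VERDICT (by name: the statement is the Claim_ definition above) =====
theorem combine_entries_py_spec : Claim_equal_combine_entries_py := by
  intro entries _
  unfold Spec_combine_entries_py combine_entries_py combine_entries_py_alt
  dsimp only
  rw [PySem.List.foldl_append_singleton_eq_map
        (f := fun kp : (Bool × String) × List String => (pvRegexOf kp.2, kp.1.2, kp.1.1)),
      pv_items_grouped, List.map_map]
  rfl
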